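-- pv_equiv track=rewrite | github.com/Abu-bakkar-siddique/Leetcode-practice-solutions | is_anagram.py | removeAnagram
-- ===== SOURCE A (Python) =====
-- def removeAnagram( words: list) -> list:
--     # two pointers
--     i = 1
--     j = 0
--     while(i < len(words)):
--         if sorted(words[i]) == sorted(words[j]):
--             del words[i]
--         else:
--             i += 1
--             j += 1
--
--     return words
-- ===== SOURCE B (Python) =====
-- def removeAnagram(words: list) -> list:
--     # single pass: keep a word unless it is an anagram of the last kept word,
--     # caching the sorted key of the last kept word (O(n*L log L) vs A's repeated sorting of the same pivot)
--     out = []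
--     last_key = None
--     for w in words:
--         k = sorted(w)
--         if not out or k != last_key:
--             out.append(w)
--             last_key = k
--     return out
-- ===== Notes on version B (the rewrite author's own statement) =====
-- stated objective: faster
-- what changed: Replaces the in-place while/del two-pointer loop with a single forward pass that builds a new list and caches the sorted key of the last kept word, so each word is sorted once and nothing is deleted from the middle of a list.
import Mathlib
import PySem

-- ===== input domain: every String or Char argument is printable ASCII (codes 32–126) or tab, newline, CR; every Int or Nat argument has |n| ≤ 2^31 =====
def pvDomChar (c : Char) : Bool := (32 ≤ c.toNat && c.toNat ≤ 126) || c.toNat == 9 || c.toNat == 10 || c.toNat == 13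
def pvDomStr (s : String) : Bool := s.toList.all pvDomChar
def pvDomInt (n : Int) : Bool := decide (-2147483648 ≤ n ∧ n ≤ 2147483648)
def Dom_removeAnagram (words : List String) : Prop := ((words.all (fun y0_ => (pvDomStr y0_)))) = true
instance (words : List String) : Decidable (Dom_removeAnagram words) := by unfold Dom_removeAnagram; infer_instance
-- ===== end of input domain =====

-- B builds a fresh output list in one pass, caching the sorted key of the last kept word,
-- instead of A's in-place two-pointer while/del loop (A mutates its argument; equivalence is about the return value).

-- sorted(w) for a string w: the list of its characters in ascending order (shared by both Pythons)
def sortKey (s : String) : List Char := PySem.List.sorted s.toList (fun c => c) false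

-- ===== PORT A =====
-- the while loop: state is the (mutated) list and the indices i, j
def loopA (words : List String) (i j : Nat) : List String :=
  if _h : i < words.length then
    if sortKey (words.getD i "") = sortKey (words.getD j "") then
      loopA (words.eraseIdx i) i j
    else
      loopA words (i + 1) (j + 1)
  else
    words
termination_by words.length - i
decreasing_by
  · have := List.length_eraseIdx_of_lt _h; omega
  · omega

def removeAnagram (words : List String) : List String := loopA words 1 0

-- ===== PORT B =====
-- the for loop after the first kept word: k is the cached sorted key of the last kept word
def goB (k : List Char) : List String → List String
  | [] => []
  | w :: ws => if sortKey w = k then goB k ws else w :: goB (sortKey w) ws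

def removeAnagram_alt (words : List String) : List String :=
  match words with
  | [] => []
  | w :: ws => w :: goB (sortKey w) ws

-- ===== PRECONDITION & SPEC =====
def Spec_removeAnagram (words : List String) (out : List String) : Prop := out = removeAnagram_alt words
instance (words : List String) (out : List String) : Decidable (Spec_removeAnagram words out) := by unfold Spec_removeAnagram; infer_instance

-- ===== CLAIM (what is proved, stated in full; the proofs are below) =====
def Claim_equal_removeAnagram : Prop := ∀ (words : List String), Dom_removeAnagram words → Spec_removeAnagram words (removeAnagram words)

-- ===== LEMMAS AND PROOFS =====

-- invariant of A's loop: the kept prefix is pre ++ [w], i = pre.length + 1, j = pre.length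
theorem loopA_eq_goB (rest : List String) : ∀ (pre : List String) (w : String),
    loopA (pre ++ w :: rest) (pre.length + 1) pre.length = pre ++ w :: goB (sortKey w) rest := by
  induction rest with
  | nil =>
      intro pre w
      rw [loopA]
      simp [goB]
  | cons r rs ih =>
      intro pre w
      rw [loopA]
      have hi : pre.length + 1 < (pre ++ w :: r :: rs).length := by simp
      have hgi : (pre ++ w :: r :: rs).getD (pre.length + 1) "" = r := by
        simp [List.getD]
      have hgj : (pre ++ w :: r :: rs).getD pre.length "" = w := by
        simp [List.getD]
      rw [dif_pos hi, hgi, hgj]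
      by_cases hk : sortKey r = sortKey w
      · rw [if_pos hk]
        have herase : (pre ++ w :: r :: rs).eraseIdx (pre.length + 1) = pre ++ w :: rs := by
          have h1 : pre ++ w :: r :: rs = (pre ++ [w]) ++ r :: rs := by simp
          have h2 : pre.length + 1 = (pre ++ [w]).length + 0 := by simp
          rw [h1, h2, List.eraseIdx_append_of_length_le (by omega)]
          simp
        rw [herase, ih pre w]
        simp [goB, hk]
      · rw [if_neg hk]
        have h1 : pre ++ w :: r :: rs = (pre ++ [w]) ++ r :: rs := by simp
        have h2 : pre.length + 1 + 1 = (pre ++ [w]).length + 1 := by simp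
        have h3 : pre.length + 1 = (pre ++ [w]).length := by simp
        rw [h1, h2]
        conv_lhs => rw [h3]
        rw [ih (pre ++ [w]) r]
        simp [goB, hk]

-- ===== VERDICT (by name: the statement is the Claim_ definition above) =====
theorem removeAnagram_spec : Claim_equal_removeAnagram := by
  intro words _
  unfold Spec_removeAnagram removeAnagram removeAnagram_alt
  cases words with
  | nil => rw [loopA]; simp
  | cons w ws =>
      have := loopA_eq_goB ws [] w
      simpa using this
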